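-- pv_equiv track=rewrite | github.com/AlexisFuli/taller-3-python | parametros url brayan.py | obtener_parametros
-- ===== SOURCE A (Python) =====
-- def obtener_parametros(url):
--     parametros = []
--     i = 0
--     while i < len(url):
--         if url[i] == "=":
--             i += 1
--             valor = ""
--
--             while i < len(url) and url[i] != "&" and url[i] != " ":
--                 valor += url[i]
--                 i += 1
--
--             if valor != "":
--                 parametros.append(valor)
--         else:
--             i += 1
--
--     return parametros
-- ===== SOURCE B (Python) =====
-- def obtener_parametros(url):
--     # Normalize both delimiters to '&', tokenize, then take what follows
--     # the first '=' of each token.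
--     normalizada = ''.join('&' if c == ' ' else c for c in url)
--     valores = []
--     for segmento in normalizada.split('&'):
--         i = segmento.find('=')
--         if i >= 0:
--             valor = segmento[i + 1:]
--             if valor:
--                 valores.append(valor)
--     return valores
-- ===== Notes on version B (the rewrite author's own statement) =====
-- stated objective: idiomatic
-- what changed: Replaces A's index-driven nested while-loop character scanner with an idiomatic normalize-then-split pass: space delimiters are mapped to the ampersand delimiter, the string is tokenized by splitting on it, and each token contributes everything after its first equals sign when that part is non-empty; measured constant-factor speedup from native str.split over per-character indexing and string concatenation.
import Mathlib
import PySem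

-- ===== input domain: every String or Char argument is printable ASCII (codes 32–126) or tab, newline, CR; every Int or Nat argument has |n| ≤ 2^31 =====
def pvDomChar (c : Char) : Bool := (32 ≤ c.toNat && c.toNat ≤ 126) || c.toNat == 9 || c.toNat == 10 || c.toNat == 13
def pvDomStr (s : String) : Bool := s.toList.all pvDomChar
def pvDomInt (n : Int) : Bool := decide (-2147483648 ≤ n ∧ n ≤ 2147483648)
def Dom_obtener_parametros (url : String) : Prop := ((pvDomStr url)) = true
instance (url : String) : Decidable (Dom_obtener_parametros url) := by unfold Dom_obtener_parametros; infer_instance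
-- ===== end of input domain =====

-- B replaces A's nested index-driven character scanner by normalize-delimiters + split + per-token take-after-first-'=' (idiomatic decomposition, same results).

-- ===== PORT A =====
-- inner while loop: collect characters until '&' or ' ' (or end); returns (valor, rest of the string from the delimiter on)
def pvValor : List Char → List Char × List Char
  | [] => ([], [])
  | c :: cs =>
    if c ≠ '&' ∧ c ≠ ' ' then
      ((c :: (pvValor cs).1), (pvValor cs).2)
    else ([], c :: cs)

theorem pvValor_snd_length_le (cs : List Char) : (pvValor cs).2.length ≤ cs.length := by
  induction cs with
  | nil => simp [pvValor]
  | cons c cs ih =>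
    simp only [pvValor]
    split
    · simpa using Nat.le_succ_of_le ih
    · simp

-- outer while loop over the url characters
def pvScan : List Char → List (List Char)
  | [] => []
  | c :: cs =>
    if c = '=' then
      if (pvValor cs).1 ≠ [] then (pvValor cs).1 :: pvScan (pvValor cs).2
      else pvScan (pvValor cs).2
    else pvScan cs
  termination_by cs => cs.length
  decreasing_by
  · exact Nat.lt_succ_of_le (pvValor_snd_length_le cs)
  · exact Nat.lt_succ_of_le (pvValor_snd_length_le cs)
  · exact Nat.lt_succ_of_le (Nat.le_refl _)

def obtener_parametros (url : String) : List String :=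
  (pvScan url.toList).map String.ofList

-- ===== PORT B =====
-- ''.join('&' if c == ' ' else c for c in url)
def pvNorm (c : Char) : Char := if c = ' ' then '&' else c

def obtener_parametros_alt (url : String) : List String :=
  let normalizada := url.toList.map pvNorm
  (PySem.Chars.splitOn normalizada ['&']).foldl
    (fun acc seg =>
      let i := PySem.Chars.find seg ['=']
      if 0 ≤ i then
        if PySem.Chars.slice seg (some (i + 1)) ≠ [] then
          acc ++ [String.ofList (PySem.Chars.slice seg (some (i + 1)))]
        else acc
      else acc) []

-- ===== PRECONDITION & SPEC =====
def Spec_obtener_parametros (url : String) (out : List String) : Prop := out = obtener_parametros_alt url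
instance (url : String) (out : List String) : Decidable (Spec_obtener_parametros url out) := by unfold Spec_obtener_parametros; infer_instance

-- ===== CLAIM (what is proved, stated in full; the proofs are below) =====
def Claim_equal_obtener_parametros : Prop := ∀ (url : String), Dom_obtener_parametros url → Spec_obtener_parametros url (obtener_parametros url)

-- ===== LEMMAS AND PROOFS =====

-- delimiter predicate ('&' or ' ')
def pvDelim (c : Char) : Bool := c == '&' || c == ' '

-- what B extracts from one token: everything after the first '='
def pvVal (seg : List Char) : List Char := seg.drop (seg.findIdx (· == '=') + 1)

def pvGood (seg : List Char) : Bool := decide ('=' ∈ seg) && decide (pvVal seg ≠ [])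

def pvProc (segs : List (List Char)) : List (List Char) := (segs.filter pvGood).map pvVal

def pvTail (cs : List Char) : List (List Char) :=
  match cs.dropWhile (fun c => !pvDelim c) with
  | [] => []
  | _ :: r => List.splitOnP pvDelim r

theorem pvValor_eq (cs : List Char) :
    pvValor cs = (cs.takeWhile (fun c => !pvDelim c), cs.dropWhile (fun c => !pvDelim c)) := by
  induction cs with
  | nil => simp [pvValor, pvDelim]
  | cons c cs ih =>
    by_cases h : c ≠ '&' ∧ c ≠ ' '
    · have hd : pvDelim c = false := by simp [pvDelim, h.1, h.2]
      simp [pvValor, h, hd, ih]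
    · have hd : pvDelim c = true := by
        rcases not_and_or.mp h with h1 | h1 <;> simp at h1 <;> simp [pvDelim, h1]
      simp [pvValor, h, hd]

theorem pvSplitOnP_struct (cs : List Char) :
    List.splitOnP pvDelim cs = cs.takeWhile (fun c => !pvDelim c) :: pvTail cs := by
  induction cs with
  | nil => simp [List.splitOnP_nil, pvTail]
  | cons c cs ih =>
    by_cases hd : pvDelim c = true
    · simp [List.splitOnP_cons, hd, pvTail]
    · simp only [Bool.not_eq_true] at hd
      simp [List.splitOnP_cons, hd, ih, pvTail]

theorem pvProc_modifyHead (c : Char) (hc : c ≠ '=') (L : List (List Char)) :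
    pvProc (L.modifyHead (List.cons c)) = pvProc L := by
  cases L with
  | nil => simp
  | cons s ls =>
    have hcb : (c == '=') = false := by simpa using hc
    have hv : pvVal (c :: s) = pvVal s := by
      simp [pvVal, List.findIdx_cons, hcb]
    have hg : pvGood (c :: s) = pvGood s := by
      have : ('=' = c) = False := by simp [Ne.symm hc]
      simp [pvGood, hv, this]
    simp only [List.modifyHead]
    by_cases h : pvGood s = true
    · simp [pvProc, hg, h, hv]
    · simp only [Bool.not_eq_true] at h
      simp [pvProc, hg, h]

theorem pvDropWhile_head {p : Char → Bool} {l xs : List Char} {x : Char}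
    (h : l.dropWhile p = x :: xs) : p x = false := by
  induction l with
  | nil => simp [List.dropWhile] at h
  | cons a l ih =>
    rw [List.dropWhile_cons] at h
    by_cases ha : p a = true
    · rw [if_pos ha] at h; exact ih h
    · rw [if_neg ha] at h
      cases h
      simpa using ha

theorem pvDelim_ne_eq {c : Char} (hd : pvDelim c = true) : c ≠ '=' := by
  have h : c = '&' ∨ c = ' ' := by simpa [pvDelim] using hd
  rcases h with h | h <;> simp [h]

theorem pvScan_eq_proc : ∀ (n : Nat) (cs : List Char), cs.length ≤ n →
    pvScan cs = pvProc (List.splitOnP pvDelim cs) := by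
  intro n
  induction n with
  | zero =>
    intro cs h
    have hnil : cs = [] := List.eq_nil_of_length_eq_zero (Nat.le_zero.mp h)
    subst hnil
    simp [pvScan, pvProc, List.splitOnP_nil, pvGood]
  | succ n ih =>
    intro cs h
    cases cs with
    | nil => simp [pvScan, pvProc, List.splitOnP_nil, pvGood]
    | cons c cs =>
      have hlen : cs.length ≤ n := by simpa using h
      by_cases hd : pvDelim c = true
      · have hne : c ≠ '=' := pvDelim_ne_eq hd
        rw [pvScan, if_neg hne, ih cs hlen, List.splitOnP_cons, if_pos hd]
        simp [pvProc, pvGood]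
      · simp only [Bool.not_eq_true] at hd
        by_cases he : c = '='
        · subst he
          rw [pvScan, if_pos rfl, pvValor_eq cs, List.splitOnP_cons,
            if_neg (by decide : ¬ (pvDelim '=' = true)), pvSplitOnP_struct cs]
          dsimp only
          simp only [List.modifyHead]
          set tw := cs.takeWhile (fun c => !pvDelim c) with htw
          set dw := cs.dropWhile (fun c => !pvDelim c) with hdwdef
          have hscan_dw : pvScan dw = pvProc (pvTail cs) := by
            cases hdd : dw with
            | nil => simp [pvScan, pvTail, ← hdwdef, hdd, pvProc]
            | cons d r =>
              have hpd : pvDelim d = true := by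
                have := pvDropWhile_head (hdwdef ▸ hdd)
                simpa using this
              have hrlen : r.length ≤ n := by
                have h1 : dw.length ≤ cs.length := List.length_dropWhile_le _ _
                rw [hdd] at h1
                simp at h1
                omega
              rw [pvScan, if_neg (pvDelim_ne_eq hpd), ih r hrlen]
              simp [pvTail, ← hdwdef, hdd]
          have hval : pvVal ('=' :: tw) = tw := by
            simp [pvVal, List.findIdx_cons]
          have hgood : pvGood ('=' :: tw) = decide (tw ≠ []) := by
            simp [pvGood, hval]
          by_cases htwn : tw ≠ []
          · rw [if_pos htwn, hscan_dw]
            have hg : pvGood ('=' :: tw) = true := by rw [hgood]; simpa using htwn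
            simp [pvProc, hg, hval]
          · rw [if_neg htwn, hscan_dw]
            have hg : pvGood ('=' :: tw) = false := by
              rw [hgood]; simpa using not_not.mp htwn
            simp [pvProc, hg]
        · rw [pvScan, if_neg he, ih cs hlen, List.splitOnP_cons, if_neg (by simp [hd]),
            pvProc_modifyHead c he]

theorem pvGo_eq (l : List Char) : ∀ (fuel : Nat) (cur : List Char) (acc : List (List Char)),
    l.length ≤ fuel →
    PySem.Chars.splitOn.go ['&'] fuel l cur acc
      = acc.reverse ++ (List.splitOnP (· == '&') l).modifyHead (cur.reverse ++ ·) := by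
  induction l with
  | nil =>
    intro fuel cur acc h
    cases fuel <;> simp [PySem.Chars.splitOn.go, List.splitOnP_nil]
  | cons c rest ih =>
    intro fuel cur acc h
    cases fuel with
    | zero => simp at h
    | succ f =>
      have hle : rest.length ≤ f := by simpa using h
      by_cases hc : c = '&'
      · subst hc
        simp only [PySem.Chars.splitOn.go, List.isPrefixOf, beq_self_eq_true, Bool.true_and,
          if_true]
        simp only [List.length_cons, List.length_nil, List.drop_succ_cons, List.drop_zero]
        rw [ih f [] (cur.reverse :: acc) hle]
        cases hsp : List.splitOnP (· == '&') rest <;>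
          simp [List.splitOnP_cons, hsp]
      · have hpre : List.isPrefixOf ['&'] (c :: rest) = false := by
          simp [List.isPrefixOf]
          intro h'; exact absurd h'.symm hc
        simp only [PySem.Chars.splitOn.go, hpre, Bool.false_eq_true, if_false]
        rw [ih f (c :: cur) acc hle]
        have hcb : (c == '&') = false := by simpa using hc
        cases hsp : List.splitOnP (· == '&') rest <;>
          simp [List.splitOnP_cons, hcb, hsp]

theorem pvSplitOn_eq (cs : List Char) :
    PySem.Chars.splitOn cs ['&'] = List.splitOnP (· == '&') cs := by
  rw [PySem.Chars.splitOn, pvGo_eq cs (cs.length + 1) [] [] (Nat.le_succ _)]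
  cases List.splitOnP (· == '&') cs <;> simp

theorem pvSplitOnP_map_norm (cs : List Char) :
    List.splitOnP (· == '&') (cs.map pvNorm) = List.splitOnP pvDelim cs := by
  induction cs with
  | nil => simp
  | cons c cs ih =>
    by_cases hs : c = ' '
    · subst hs; simp [pvNorm, List.splitOnP_cons, pvDelim, ih]
    · by_cases ha : c = '&'
      · subst ha; simp [pvNorm, List.splitOnP_cons, pvDelim, ih]
      · have hd : pvDelim c = false := by simp [pvDelim, ha, hs]
        simp [pvNorm, hs, List.splitOnP_cons, ha, hd, ih]

theorem pvSingleton_prefix {a : Char} {l : List Char} : ([a] <+: l) ↔ l.head? = some a := by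
  constructor
  · rintro ⟨t, rfl⟩; rfl
  · intro h
    cases l with
    | nil => simp at h
    | cons b t => simp at h; subst h; exact ⟨t, rfl⟩

theorem pvFind_eq_findIdx (seg : List Char) (hm : '=' ∈ seg) :
    PySem.Chars.find seg ['='] = (seg.findIdx (· == '=') : Int) := by
  have h0 : 0 ≤ PySem.Chars.find seg ['='] :=
    (PySem.Chars.find_nonneg_iff seg ['=']).mpr ((List.singleton_infix_iff '=' seg).mpr hm)
  obtain ⟨hpre, hmin⟩ := PySem.Chars.find_spec h0
  set i := (PySem.Chars.find seg ['=']).toNat with hi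
  set t := seg.findIdx (· == '=') with ht
  have htlt : t < seg.length := List.findIdx_lt_length.mpr ⟨'=', hm, by simp⟩
  have hit : seg[i]'(by
      have := pvSingleton_prefix.mp hpre
      by_contra hge
      push Not at hge
      rw [List.drop_eq_nil_of_le hge] at this
      simp at this) = '=' := by
    have := pvSingleton_prefix.mp hpre
    rwa [List.head?_drop, List.getElem?_eq_getElem, Option.some_inj] at this
  have h1 : ¬ t < i := by
    intro hlt
    exact hmin t hlt (pvSingleton_prefix.mpr (by
      rw [List.head?_drop, List.getElem?_eq_getElem htlt, Option.some_inj]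
      simpa using (List.findIdx_getElem (w := htlt))))
  have h2 : ¬ i < t := by
    intro hlt
    have hne : ¬ seg[i] = '=' := by
      simpa using List.not_of_lt_findIdx (p := (· == '=')) (xs := seg) hlt
    exact hne hit
  have : i = t := by omega
  rw [← Int.toNat_of_nonneg h0, ← hi, this]

theorem pvStep_eq (acc : List String) (seg : List Char) :
    (if 0 ≤ PySem.Chars.find seg ['='] then
        if PySem.Chars.slice seg (some (PySem.Chars.find seg ['='] + 1)) ≠ [] then
          acc ++ [String.ofList (PySem.Chars.slice seg (some (PySem.Chars.find seg ['='] + 1)))]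
        else acc
      else acc)
      = if pvGood seg then acc ++ [String.ofList (pvVal seg)] else acc := by
  by_cases hm : '=' ∈ seg
  · rw [pvFind_eq_findIdx seg hm]
    have hslice : PySem.Chars.slice seg (some ((seg.findIdx (· == '=') : Int) + 1)) = pvVal seg := by
      have h1 : (0:Int) ≤ (seg.findIdx (· == '=') : Int) + 1 := by positivity
      rw [PySem.Chars.slice_eq_listSlice, PySem.List.slice_from seg h1]
      simp [pvVal]
    rw [hslice, if_pos (by positivity : (0:Int) ≤ (seg.findIdx (· == '=') : Int))]
    by_cases hv : pvVal seg ≠ []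
    · have hg : pvGood seg = true := by simp [pvGood, hm]; simpa using hv
      rw [if_pos hv, if_pos hg]
    · have hg : pvGood seg = false := by simp [pvGood]; intro _; simpa using not_not.mp hv
      rw [if_neg hv, if_neg (by simp [hg])]
  · have hfind : PySem.Chars.find seg ['='] = -1 :=
      (PySem.Chars.find_eq_neg_one_iff seg ['=']).mpr
        (fun h => hm ((List.singleton_infix_iff '=' seg).mp h))
    have hg : pvGood seg = false := by simp [pvGood, hm]
    rw [hfind, if_neg (by decide : ¬ ((0:Int) ≤ -1)), if_neg (by simp [hg])]

-- ===== VERDICT (by name: the statement is the Claim_ definition above) =====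
theorem obtener_parametros_spec : Claim_equal_obtener_parametros := by
  intro url _
  unfold Spec_obtener_parametros obtener_parametros obtener_parametros_alt
  have hfun : (fun (acc : List String) (seg : List Char) =>
      let i := PySem.Chars.find seg ['=']
      if 0 ≤ i then
        if PySem.Chars.slice seg (some (i + 1)) ≠ [] then
          acc ++ [String.ofList (PySem.Chars.slice seg (some (i + 1)))]
        else acc
      else acc)
      = (fun acc seg => if pvGood seg then acc ++ [String.ofList (pvVal seg)] else acc) := by
    funext acc seg; exact pvStep_eq acc seg
  rw [hfun, PySem.List.foldl_append_if, pvSplitOn_eq, pvSplitOnP_map_norm,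
    pvScan_eq_proc url.toList.length url.toList (Nat.le_refl _)]
  simp [pvProc, List.map_map, Function.comp]
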